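-- pv_equiv track=rewrite | github.com/jianhui-ben/leetcode_python | uber_oa_处理字符串.py | process
-- ===== SOURCE A (Python) =====
-- def process(s):
--     ## ordered dictionary
--     import collections
--     temp = {'W':0, 'D':0, 'L':0}
--     for i in s:
--         temp[i]+=1
--     ## use a deque
--     stored = collections.deque()
--     for i, v in temp.items():
--         if v>0:
--             stored.append((i, v))
--     res=''
--     while stored:
--         cur_let, v = stored.popleft()
--         if v==0:
--             continue
--         res+=cur_let
--         stored.append((cur_let, v-1))
--     return res
-- ===== SOURCE B (Python) =====
-- def process(s):
--     # Count into the same fixed-key dict (other characters raise KeyError, as in A),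
--     # then rebuild the round-robin interleaving by explicit round indices: round r
--     # emits, in W,D,L order, every letter whose count exceeds r.
--     temp = {'W': 0, 'D': 0, 'L': 0}
--     for i in s:
--         temp[i] += 1
--     m = max(temp.values())
--     out = []
--     for r in range(m):
--         for letter in 'WDL':
--             if temp[letter] > r:
--                 out.append(letter)
--     return ''.join(out)
-- ===== Notes on version B (the rewrite author's own statement) =====
-- stated objective: simpler
-- what changed: Replaces the deque-based FIFO simulation (pop a (letter,count) pair, emit, re-append with count-1 until all counts hit zero) by a direct construction: count once, take m = max count, and for each round index r in range(m) emit the letters whose count exceeds r, so no mutable queue or per-step re-insertion remains.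
import Mathlib
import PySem

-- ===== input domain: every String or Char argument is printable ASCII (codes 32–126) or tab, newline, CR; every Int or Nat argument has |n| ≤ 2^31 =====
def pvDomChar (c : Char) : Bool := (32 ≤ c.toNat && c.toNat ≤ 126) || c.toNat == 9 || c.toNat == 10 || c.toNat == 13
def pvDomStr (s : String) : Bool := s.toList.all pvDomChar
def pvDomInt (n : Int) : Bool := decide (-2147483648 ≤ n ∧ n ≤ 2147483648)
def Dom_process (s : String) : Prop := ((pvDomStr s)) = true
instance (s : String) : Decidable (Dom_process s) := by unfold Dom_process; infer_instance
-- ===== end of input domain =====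

-- B replaces A's deque round-robin (pop, emit, re-append count-1) by counting once and
-- emitting, for each round index r < max count, the letters whose count exceeds r (objective: simpler).

-- ===== PORT A =====
-- temp[i] += 1 : KeyError (none) when i is not a key of the fixed dict
def pvCountA (cs : List Char) (temp : PySem.Dict Char Int) : Option (PySem.Dict Char Int) :=
  match cs with
  | [] => some temp
  | c :: rest =>
    match temp.get? c with
    | some v => pvCountA rest (temp.insert c (v + 1))
    | none => none

-- the deque loop; counts are ≥ 0 in every reachable state, carried as Nat (same values) for termination
def pvLoopA (stored : List (Char × Nat)) (res : List Char) : List Char :=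
  match stored with
  | [] => res
  | (c, v) :: rest =>
    if v = 0 then pvLoopA rest res
    else pvLoopA (rest ++ [(c, v - 1)]) (res ++ [c])
termination_by ((stored.map (·.2)).sum + stored.length)
decreasing_by
  · simp; omega
  · simp; omega

def process (s : String) : String :=
  match pvCountA s.toList (PySem.Dict.mk [('W', 0), ('D', 0), ('L', 0)]) with
  | none => ""   -- KeyError: excluded by Pre_process
  | some temp =>
    let stored := (temp.items.filter (fun p => 0 < p.2)).map (fun p => (p.1, p.2.toNat))
    String.mk (pvLoopA stored [])

-- ===== PORT B =====
def pvCountB (cs : List Char) (temp : PySem.Dict Char Int) : Option (PySem.Dict Char Int) :=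
  match cs with
  | [] => some temp
  | c :: rest =>
    match temp.get? c with
    | some v => pvCountB rest (temp.insert c (v + 1))
    | none => none

def process_alt (s : String) : String :=
  match pvCountB s.toList (PySem.Dict.mk [('W', 0), ('D', 0), ('L', 0)]) with
  | none => ""   -- KeyError: excluded by Pre_process
  | some temp =>
    -- max(temp.values()): values has exactly three elements, so max? is always some
    let m := ((PySem.List.max? temp.values (fun v => v)).getD 0).toNat
    String.mk ((List.range m).flatMap (fun (r : Nat) =>
      ['W', 'D', 'L'].filter (fun letter => (r : Int) < temp.getD letter 0)))

-- ===== PRECONDITION & SPEC =====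
-- Pre_ excludes exactly the inputs containing a character other than 'W','D','L',
-- on which both Pythons raise KeyError.
def Pre_process (s : String) : Prop := (s.toList.all fun c => c == 'W' || c == 'D' || c == 'L') = true
instance (s : String) : Decidable (Pre_process s) := by unfold Pre_process; infer_instance
def pvWitness_process : String := "WWDLW"

def Spec_process (s : String) (out : String) : Prop := out = process_alt s
instance (s : String) (out : String) : Decidable (Spec_process s out) := by unfold Spec_process; infer_instance

-- ===== CLAIM (what is proved, stated in full; the proofs are below) =====
def Claim_equal_process : Prop := ∀ (s : String), Dom_process s → Pre_process s → Spec_process s (process s)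

-- ===== LEMMAS AND PROOFS =====

-- value emitted this round / deque after one full round
def pvEmit (st : List (Char × Nat)) : List Char := (st.filter (fun p => p.2 ≠ 0)).map (·.1)
def pvDec (st : List (Char × Nat)) : List (Char × Nat) :=
  st.filterMap (fun p => if p.2 = 0 then none else some (p.1, p.2 - 1))
def pvMaxV (st : List (Char × Nat)) : Nat := st.foldr (fun p m => max p.2 m) 0

theorem pvCount_char (cs : List Char) (a b l : Int)
    (h : ∀ c ∈ cs, c = 'W' ∨ c = 'D' ∨ c = 'L') :
    pvCountA cs (PySem.Dict.mk [('W', a), ('D', b), ('L', l)]) =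
      some (PySem.Dict.mk [('W', a + cs.count 'W'), ('D', b + cs.count 'D'), ('L', l + cs.count 'L')]) := by
  induction cs generalizing a b l with
  | nil => simp [pvCountA]
  | cons c rest ih =>
    have hc := h c (List.mem_cons_self ..)
    have hrest : ∀ c ∈ rest, c = 'W' ∨ c = 'D' ∨ c = 'L' := fun x hx => h x (List.mem_cons_of_mem _ hx)
    rcases hc with rfl | rfl | rfl <;>
      simp [pvCountA, PySem.Dict.get?, PySem.Dict.insert, ih _ _ _ hrest]  <;> ring_nf

theorem pvLoopA_round (st extra : List (Char × Nat)) (acc : List Char) :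
    pvLoopA (st ++ extra) acc = pvLoopA (extra ++ pvDec st) (acc ++ pvEmit st) := by
  induction st generalizing extra acc with
  | nil => simp [pvEmit, pvDec]
  | cons p rest ih =>
    obtain ⟨c, v⟩ := p
    by_cases hv : v = 0
    · subst hv
      simp only [List.cons_append, pvLoopA, if_pos]
      rw [ih]
      simp [pvEmit, pvDec]
    · simp only [List.cons_append, pvLoopA, if_neg hv]
      rw [List.append_assoc, ih (extra ++ [(c, v - 1)]) (acc ++ [c])]
      simp [pvEmit, pvDec, hv]

theorem pvLoopA_acc (st : List (Char × Nat)) (acc : List Char) :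
    pvLoopA st acc = acc ++ pvLoopA st [] := by
  generalize hn : (st.map (·.2)).sum + st.length = n
  induction n using Nat.strong_induction_on generalizing st acc with
  | _ n ih =>
    match st with
    | [] => simp [pvLoopA]
    | (c, v) :: rest =>
      by_cases hv : v = 0
      · subst hv
        simp only [pvLoopA, if_pos]
        exact ih _ (by simp at hn; omega) rest acc rfl
      · have key : ∀ a, pvLoopA (rest ++ [(c, v - 1)]) a = a ++ pvLoopA (rest ++ [(c, v - 1)]) [] := by
          intro a
          exact ih (((rest ++ [(c, v - 1)]).map (·.2)).sum + (rest ++ [(c, v - 1)]).length)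
            (by simp at hn ⊢; omega) _ a (by simp)
        simp only [pvLoopA, if_neg hv]
        rw [key (acc ++ [c]), key ([] ++ [c])]
        simp

theorem pvMaxV_dec (st : List (Char × Nat)) : pvMaxV (pvDec st) = pvMaxV st - 1 := by
  induction st with
  | nil => simp [pvMaxV, pvDec]
  | cons p rest ih =>
    obtain ⟨c, v⟩ := p
    by_cases hv : v = 0 <;> simp [pvMaxV, pvDec, hv] at ih ⊢ <;> omega

theorem pvDec_filter (st : List (Char × Nat)) (r : Nat) :
    ((pvDec st).filter (fun p => r < p.2)).map (·.1) = (st.filter (fun p => r + 1 < p.2)).map (·.1) := by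
  induction st with
  | nil => simp [pvDec]
  | cons p rest ih =>
    obtain ⟨c, v⟩ := p
    by_cases hv : v = 0
    · subst hv
      have hd : pvDec ((c, 0) :: rest) = pvDec rest := by simp [pvDec]
      rw [hd, List.filter_cons_of_neg (by simp)]
      exact ih
    · have hd : pvDec ((c, v) :: rest) = (c, v - 1) :: pvDec rest := by simp [pvDec, hv]
      rw [hd]
      by_cases hr : r + 1 < v
      · rw [List.filter_cons_of_pos (by simp; omega), List.filter_cons_of_pos (by simpa using hr)]
        simp [ih]
      · rw [List.filter_cons_of_neg (by simp; omega), List.filter_cons_of_neg (by simpa using hr)]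
        exact ih

theorem pv_le_maxV : ∀ (st : List (Char × Nat)), ∀ p ∈ st, p.2 ≤ pvMaxV st := by
  intro st
  induction st with
  | nil => simp
  | cons q rest ih =>
    intro p hp
    rcases List.mem_cons.mp hp with rfl | h
    · simp [pvMaxV]
    · have := ih p h
      simp [pvMaxV] at this ⊢
      omega

theorem pvLoopA_main (st : List (Char × Nat)) :
    pvLoopA st [] = (List.range (pvMaxV st)).flatMap (fun r => (st.filter (fun p => r < p.2)).map (·.1)) := by
  generalize hm : pvMaxV st = m
  induction m generalizing st with
  | zero =>
    have hz : ∀ p ∈ st, p.2 = 0 := fun p hp => by have := pv_le_maxV st p hp; omega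
    have h1 := pvLoopA_round st [] []
    have hdec : pvDec st = [] := by
      simp [pvDec, List.filterMap_eq_nil_iff]
      intro a b hab
      exact hz (a, b) hab
    have hemit : pvEmit st = [] := by
      simp [pvEmit, List.filter_eq_nil_iff]
      intro a b hab
      exact hz (a, b) hab
    simpa [hdec, hemit, pvLoopA] using h1
  | succ k ih =>
    have h1 := pvLoopA_round st [] []
    simp only [List.append_nil, List.nil_append] at h1
    have hdm : pvMaxV (pvDec st) = k := by rw [pvMaxV_dec, hm]; omega
    rw [h1, pvLoopA_acc, ih (pvDec st) hdm, List.range_succ_eq_map]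
    simp only [List.flatMap_cons, List.flatMap_map]
    have e1 : pvEmit st = List.map (fun x => x.1) (List.filter (fun p => decide (0 < p.2)) st) := by
      simp only [pvEmit]
      congr 1
      apply List.filter_congr
      intro p _
      simp [Nat.pos_iff_ne_zero]
    have e2 : List.flatMap
          (fun r => List.map (fun x => x.1) (List.filter (fun p => decide (r < p.2)) (pvDec st)))
          (List.range k)
        = List.flatMap
          (fun r => List.map (fun x => x.1) (List.filter (fun p => decide (r + 1 < p.2)) st))
          (List.range k) := by
      apply List.flatMap_congr
      intro r _
      simpa using pvDec_filter st r
    rw [e1, e2]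

theorem pvCountB_eq (cs : List Char) (d : PySem.Dict Char Int) : pvCountB cs d = pvCountA cs d := by
  induction cs generalizing d with
  | nil => rfl
  | cons c rest ih => simp [pvCountA, pvCountB, ih]

theorem pvMaxV_filter (st : List (Char × Nat)) :
    pvMaxV (st.filter (fun p => 0 < p.2)) = pvMaxV st := by
  induction st with
  | nil => rfl
  | cons p rest ih =>
    by_cases hv : 0 < p.2 <;> simp [pvMaxV, hv] at ih ⊢ <;> omega

theorem pvStored_eq (w d l : Nat) :
    ((([('W', (0:Int) + (w:Int)), ('D', 0 + (d:Int)), ('L', 0 + (l:Int))] : List (Char × Int)).filter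
        (fun p => 0 < p.2)).map (fun p => (p.1, p.2.toNat))) =
      ([('W', w), ('D', d), ('L', l)] : List (Char × Nat)).filter (fun p => 0 < p.2) := by
  have h1 : ((0:Int) < 0 + (w:Int)) ↔ 0 < w := by omega
  have h2 : ((0:Int) < 0 + (d:Int)) ↔ 0 < d := by omega
  have h3 : ((0:Int) < 0 + (l:Int)) ↔ 0 < l := by omega
  by_cases hw : 0 < w <;> by_cases hd : 0 < d <;> by_cases hl : 0 < l <;>
    simp [List.filter_cons, h1, h2, h3, hw, hd, hl]

theorem pvBody_eq (w d l : Nat) (r : Nat) :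
    ((([('W', w), ('D', d), ('L', l)] : List (Char × Nat)).filter (fun p => r < p.2)).map (·.1))
      = ['W', 'D', 'L'].filter (fun c : Char =>
          (r : Int) < (PySem.Dict.mk [('W', (0:Int) + (w:Int)), ('D', 0 + (d:Int)), ('L', 0 + (l:Int))]).getD c 0) := by
  have h1 : ((r:Int) < 0 + (w:Int)) ↔ r < w := by omega
  have h2 : ((r:Int) < 0 + (d:Int)) ↔ r < d := by omega
  have h3 : ((r:Int) < 0 + (l:Int)) ↔ r < l := by omega
  by_cases hw : r < w <;> by_cases hd : r < d <;> by_cases hl : r < l <;>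
    simp [List.filter_cons, PySem.Dict.getD, PySem.Dict.get?, h1, h2, h3, hw, hd, hl]

-- ===== VERDICT (by name: the statement is the Claim_ definition above) =====
theorem process_spec : Claim_equal_process := by
  intro s _ hpre
  unfold Spec_process
  have hpre' : ∀ c ∈ s.toList, c = 'W' ∨ c = 'D' ∨ c = 'L' := by
    intro c hc
    have := List.all_eq_true.mp hpre c hc
    simp only [Bool.or_eq_true, beq_iff_eq] at this
    tauto
  have hcount := pvCount_char s.toList 0 0 0 hpre'
  simp only [process, process_alt, pvCountB_eq, hcount]
  set w := s.toList.count 'W' with hw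
  set d := s.toList.count 'D' with hd
  set l := s.toList.count 'L' with hl
  have hitems : (PySem.Dict.mk [('W', (0:Int) + (w:Int)), ('D', 0 + (d:Int)), ('L', 0 + (l:Int))]).items
      = [('W', (0:Int) + (w:Int)), ('D', 0 + (d:Int)), ('L', 0 + (l:Int))] := rfl
  have hvals : (PySem.Dict.mk [('W', (0:Int) + (w:Int)), ('D', 0 + (d:Int)), ('L', 0 + (l:Int))]).values
      = [(0:Int) + (w:Int), 0 + (d:Int), 0 + (l:Int)] := rfl
  simp only [hvals, pvStored_eq]
  have hmB : (((PySem.List.max? [(0:Int) + (w:Int), 0 + (d:Int), 0 + (l:Int)] (fun v => v)).getD 0).toNat)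
      = max w (max d l) := by
    rw [PySem.List.max?_id_cons]
    simp [List.foldl]
    omega
  have hmA : pvMaxV (([('W', w), ('D', d), ('L', l)] : List (Char × Nat)).filter (fun p => 0 < p.2))
      = max w (max d l) := by
    rw [pvMaxV_filter]
    simp [pvMaxV]
  rw [pvLoopA_main, hmA, hmB]
  congr 1
  apply List.flatMap_congr
  intro r _
  rw [List.filter_filter]
  have hmerge : (([('W', w), ('D', d), ('L', l)] : List (Char × Nat)).filter
      (fun p => decide (r < p.2) && decide (0 < p.2))) =
      (([('W', w), ('D', d), ('L', l)] : List (Char × Nat)).filter (fun p => r < p.2)) := by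
    apply List.filter_congr
    intro p _
    by_cases h : r < p.2 <;> simp [h] <;> omega
  rw [hmerge, pvBody_eq]
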